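-- pv_equiv track=rewrite | github.com/LayneH/GreenMIM | modeling/group_window_attention.py | group_windows
-- ===== SOURCE A (Python) =====
-- def knapsack(W, wt):
--     '''Args:
--         W (int): capacity
--         wt (tuple[int]): the numbers of elements within each window
--     '''
--     val = wt
--     n = len(val)
--     K = [[0 for w in range(W + 1)]
--             for i in range(n + 1)]
--
--     # Build table K[][] in bottom up manner
--     for i in range(n + 1):
--         for w in range(W + 1):
--             if i == 0 or w == 0:
--                 K[i][w] = 0
--             elif wt[i - 1] <= w:
--                 K[i][w] = max(val[i - 1]
--                 + K[i - 1][w - wt[i - 1]],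
--                             K[i - 1][w])
--             else:
--                 K[i][w] = K[i - 1][w]
--
--     # stores the result of Knapsack
--     res = res_ret = K[n][W]
--
--     # stores the selected indices
--     w = W
--     idx = []
--     for i in range(n, 0, -1):
--         if res <= 0:
--             break
--         # Either the result comes from the top (K[i-1][w])
--         # or from (val[i-1] + K[i-1] [w-wt[i-1]]) as in Knapsack table.
--         # If it comes from the latter one, it means the item is included.
--         if res == K[i - 1][w]:
--             continue
--         else:
--             # This item is included.
--             idx.append(i - 1)
--             # Since this weight is included, its value is deducted
--             res = res - val[i - 1]
--             w = w - wt[i - 1]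
--
--     return res_ret, idx[::-1]   # make the idx in an increasing order
--
-- def group_windows(group_size, num_ele_win):
--     '''Greedily apply the DP algorithm to group the elements.
--     Args:
--         group_size (int): maximal size of the group
--         num_ele_win (list[int]): number of visible elements of each window
--     Outputs:
--         num_ele_group (list[int]): number of elements of each group
--         grouped_idx (list[list[int]]): the seleted indeices of each group
--     '''
--     wt = num_ele_win.copy()
--     ori_idx = list(range(len(wt)))
--     grouped_idx = []
--     num_ele_group = []
--
--     while len(wt) > 0:
--         res, idx = knapsack(group_size, wt)
--         num_ele_group.append(res)
--
--         # append the selected idx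
--         selected_ori_idx = [ori_idx[i] for i in idx]
--         grouped_idx.append(selected_ori_idx)
--
--         # remaining idx
--         wt = [wt[i] for i in range(len(ori_idx)) if i not in idx]
--         ori_idx = [ori_idx[i] for i in range(len(ori_idx)) if i not in idx]
--
--     return num_ele_group, grouped_idx
-- ===== SOURCE B (Python) =====
-- def group_windows(group_size, num_ele_win):
--     '''Greedily group elements: top-down memoized subset-sum instead of a bottom-up 2D table.'''
--     items = list(enumerate(num_ele_win))  # (original index, weight) pairs that are still ungrouped
--     num_ele_group = []
--     grouped_idx = []
--     while items:
--         wts = [w for _, w in items]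
--         memo = {}
--
--         def solve(i, w):
--             # max subset sum of wts[0:i] under capacity w
--             if i == 0 or w <= 0:
--                 return 0
--             key = (i, w)
--             if key not in memo:
--                 best = solve(i - 1, w)
--                 if wts[i - 1] <= w:
--                     best = max(best, wts[i - 1] + solve(i - 1, w - wts[i - 1]))
--                 memo[key] = best
--             return memo[key]
--
--         total = solve(len(wts), group_size)
--         # reconstruct: walking i downwards, include item i-1 exactly when
--         # skipping it cannot still reach the residual value
--         res, w, picked = total, group_size, []
--         for i in range(len(wts), 0, -1):
--             if res <= 0:
--                 break
--             if res != solve(i - 1, w):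
--                 picked.append(i - 1)
--                 res -= wts[i - 1]
--                 w -= wts[i - 1]
--         picked.reverse()
--         if not picked:
--             # no remaining window fits the group: grouping cannot make progress
--             raise ValueError("cannot group remaining windows")
--         num_ele_group.append(total)
--         grouped_idx.append([items[i][0] for i in picked])
--         picked_set = set(picked)
--         items = [it for j, it in enumerate(items) if j not in picked_set]
--     return num_ele_group, grouped_idx
-- ===== Notes on version B (the rewrite author's own statement) =====
-- stated objective: alternative
-- what changed: The bottom-up (n+1)x(W+1) knapsack table is replaced by a top-down recursively memoized solve(i, w) over (original-index, weight) pairs, with reconstruction querying the memoized solve instead of table rows and removal done by filtering enumerated pairs against a set of picked positions.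
-- outside the precondition, e.g. on group_windows(3, [0]): A does not finish within the time limit, B raises ValueError; on group_windows(3, [5]): A does not finish within the time limit, B raises ValueError; on group_windows(-1, [2]): A raises IndexError, B raises ValueError
import Mathlib
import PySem

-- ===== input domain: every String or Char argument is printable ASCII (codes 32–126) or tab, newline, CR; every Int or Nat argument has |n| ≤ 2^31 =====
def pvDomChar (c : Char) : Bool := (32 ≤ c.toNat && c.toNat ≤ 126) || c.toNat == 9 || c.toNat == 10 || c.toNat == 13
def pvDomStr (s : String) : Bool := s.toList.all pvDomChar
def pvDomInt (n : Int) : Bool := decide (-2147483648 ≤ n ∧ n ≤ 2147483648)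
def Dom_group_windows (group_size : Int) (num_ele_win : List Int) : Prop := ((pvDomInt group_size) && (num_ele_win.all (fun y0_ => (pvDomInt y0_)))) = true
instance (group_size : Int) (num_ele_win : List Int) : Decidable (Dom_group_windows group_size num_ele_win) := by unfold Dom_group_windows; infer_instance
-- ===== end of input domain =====

-- B replaces A's bottom-up (n+1)×(W+1) knapsack table with a top-down memoized solve over
-- (ungrouped (index, weight) pairs); objective: alternative decomposition, same return value.
-- Neither program observably mutates its arguments; the equivalence is about the return value.

-- ===== PORT A =====
-- Builds A's table K row by row as (rows 0..i, row i): every K[i][w] assignment in A reads only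
-- row i-1, so threading the previous row computes the same values in the same order.
-- In-range Python list indexing xs[j] (never raising inside Pre_) is ported as pyGetD.
-- pvAGet is pyGetD on an Array (same Python indexing rule, O(1) access): A's Python indexes
-- its previous table row in O(1), so the port holds that row as an Array.
def pvAGet (a : Array Int) (i : Int) (d : Int) : Int :=
  match PySem.List.pyIdx? a.size i with
  | some k => (a[k]?).getD d
  | none => d

def pvTableA (wt : List Int) (W : Int) : Nat → List (List Int) × List Int
  | 0 =>
    let r := (PySem.List.pyRange 0 (W + 1)).map (fun _ => (0 : Int))
    ([r], r)
  | i + 1 =>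
    let tp := pvTableA wt W i
    let pa := tp.2.toArray
    let wi := PySem.List.pyGetD wt (i : Int) 0
    let r := (PySem.List.pyRange 0 (W + 1)).map (fun w =>
      if w = 0 then (0 : Int)
      else if wi ≤ w then max (wi + pvAGet pa (w - wi) 0) (pvAGet pa w 0)
      else pvAGet pa w 0)
    (tp.1 ++ [r], r)

-- A's reconstruction loop 'for i in range(n, 0, -1)' (the Nat argument i+1 is Python's i).
def pvReconA (K : List (List Int)) (wt : List Int) : Nat → Int → Int → List Int → List Int
  | 0, _, _, idx => idx
  | i + 1, res, w, idx =>
    if res ≤ 0 then idx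
    else if res = PySem.List.pyGetD (PySem.List.pyGetD K (i : Int) []) w 0 then
      pvReconA K wt i res w idx
    else
      pvReconA K wt i (res - PySem.List.pyGetD wt (i : Int) 0) (w - PySem.List.pyGetD wt (i : Int) 0)
        (idx ++ [(i : Int)])

def pvKnapA (W : Int) (wt : List Int) : Int × List Int :=
  let n := wt.length
  let tk := pvTableA wt W n
  let resret := PySem.List.pyGetD tk.2 W 0
  -- idx[::-1] is List.reverse
  (resret, (pvReconA tk.1 wt n resret W []).reverse)

-- A's outer while-loop; fuel = initial length (inside Pre_ every Python iteration removes at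
-- least one element, so the Python loop makes at most that many iterations before wt is empty).
def pvLoopA (W : Int) : Nat → List Int → List Int → List Int → List (List Int) → List Int × List (List Int)
  | 0, _, _, acc1, acc2 => (acc1, acc2)
  | fuel + 1, wt, ori, acc1, acc2 =>
    if wt.length = 0 then (acc1, acc2)
    else
      let rk := pvKnapA W wt
      let sel := rk.2.map (fun i => PySem.List.pyGetD ori i 0)
      let keep := (PySem.List.pyRange 0 (ori.length : Int)).filter (fun i => !(rk.2.contains i))
      pvLoopA W fuel (keep.map (fun i => PySem.List.pyGetD wt i 0))
        (keep.map (fun i => PySem.List.pyGetD ori i 0)) (acc1 ++ [rk.1]) (acc2 ++ [sel])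

def group_windows (group_size : Int) (num_ele_win : List Int) : List Int × List (List Int) :=
  pvLoopA group_size num_ele_win.length num_ele_win
    (PySem.List.pyRange 0 (num_ele_win.length : Int)) [] []

-- ===== PORT B =====
-- B's memoized solve(i, w): max subset sum of wts[0:i] under capacity w; the memo dict is
-- threaded explicitly (the closure's 'memo' in Source B).
def pvSolveB (wts : List Int) : Nat → Int → Std.HashMap (Int × Int) Int → Int × Std.HashMap (Int × Int) Int
  | 0, _, m => (0, m)
  | i + 1, w, m =>
    if w ≤ 0 then (0, m)
    else
      match m[((((i : Int) + 1), w) : Int × Int)]? with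
      | some v => (v, m)
      | none =>
        let r1 := pvSolveB wts i w m
        if PySem.List.pyGetD wts (i : Int) 0 ≤ w then
          let r2 := pvSolveB wts i (w - PySem.List.pyGetD wts (i : Int) 0) r1.2
          let best := max r1.1 (PySem.List.pyGetD wts (i : Int) 0 + r2.1)
          (best, r2.2.insert (((i : Int) + 1), w) best)
        else
          (r1.1, r1.2.insert (((i : Int) + 1), w) r1.1)

-- B's reconstruction loop (the Nat argument i+1 is Python's i).
def pvPickB (wts : List Int) : Nat → Int → Int → List Int → Std.HashMap (Int × Int) Int → List Int
  | 0, _, _, picked, _ => picked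
  | i + 1, res, w, picked, m =>
    if res ≤ 0 then picked
    else
      let r := pvSolveB wts i w m
      if res ≠ r.1 then
        pvPickB wts i (res - PySem.List.pyGetD wts (i : Int) 0) (w - PySem.List.pyGetD wts (i : Int) 0)
          (picked ++ [(i : Int)]) r.2
      else pvPickB wts i res w picked r.2

-- One iteration of B's while-loop: returns (total, selected original indices, remaining items).
def pvStepB (W : Int) (items : List (Int × Int)) : Int × List Int × List (Int × Int) :=
  let wts := items.map (fun p => p.2)
  let r := pvSolveB wts wts.length W (∅ : Std.HashMap (Int × Int) Int)
  let picked := (pvPickB wts wts.length r.1 W [] r.2).reverse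
  let sel := picked.map (fun i => (PySem.List.pyGetD items i ((0 : Int), (0 : Int))).1)
  let pset : PySem.Set Int := PySem.Set.ofList picked
  let items' := ((PySem.List.enumerate items).filter (fun q => !(PySem.Set.contains pset q.1))).map (fun q => q.2)
  (r.1, sel, items')

def pvLoopB (W : Int) : Nat → List (Int × Int) → List Int → List (List Int) → List Int × List (List Int)
  | 0, _, acc1, acc2 => (acc1, acc2)
  | fuel + 1, items, acc1, acc2 =>
    if items.length = 0 then (acc1, acc2)
    else
      let s := pvStepB W items
      -- Source B raises ValueError when picked is empty; Pre_ excludes those inputs, so the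
      -- port's value here is unconstrained (the lemma below shows the branch never fires inside Pre_)
      if s.2.1.length = 0 then (acc1, acc2)
      else pvLoopB W fuel s.2.2 (acc1 ++ [s.1]) (acc2 ++ [s.2.1])

def group_windows_alt (group_size : Int) (num_ele_win : List Int) : List Int × List (List Int) :=
  pvLoopB group_size num_ele_win.length (PySem.List.enumerate num_ele_win) [] []

-- ===== PRECONDITION & SPEC =====
-- Pre_ excludes exactly the inputs on which the Python A never returns: with any element ≤ 0 or
-- > group_size A either diverges (the greedy loop stops removing elements) or raises an
-- IndexError in the DP table; A returns on every input satisfying Pre_.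
def Pre_group_windows (group_size : Int) (num_ele_win : List Int) : Prop :=
  ∀ x ∈ num_ele_win, 1 ≤ x ∧ x ≤ group_size
instance (group_size : Int) (num_ele_win : List Int) : Decidable (Pre_group_windows group_size num_ele_win) := by
  unfold Pre_group_windows; infer_instance

def pvWitness_group_windows : Int × List Int := (5, [2, 3, 4, 1])

def Spec_group_windows (group_size : Int) (num_ele_win : List Int) (out : List Int × List (List Int)) : Prop :=
  out = group_windows_alt group_size num_ele_win
instance (group_size : Int) (num_ele_win : List Int) (out : List Int × List (List Int)) : Decidable (Spec_group_windows group_size num_ele_win out) := by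
  unfold Spec_group_windows; infer_instance

-- ===== CLAIM (what is proved, stated in full; the proofs are below) =====
def Claim_equal_group_windows : Prop := ∀ (group_size : Int) (num_ele_win : List Int), Dom_group_windows group_size num_ele_win → Pre_group_windows group_size num_ele_win → Spec_group_windows group_size num_ele_win (group_windows group_size num_ele_win)

-- ===== LEMMAS AND PROOFS =====

-- The common specification value: max subset sum of wts[0:i] under capacity w.
def pvS (wts : List Int) : Nat → Int → Int
  | 0, _ => 0
  | i + 1, w =>
    if w ≤ 0 then 0
    else if PySem.List.pyGetD wts (i : Int) 0 ≤ w then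
      max (pvS wts i w) (PySem.List.pyGetD wts (i : Int) 0 + pvS wts i (w - PySem.List.pyGetD wts (i : Int) 0))
    else pvS wts i w

-- Memo invariant: every stored entry is the spec value.
def pvInv (wts : List Int) (m : Std.HashMap (Int × Int) Int) : Prop :=
  ∀ (i : Nat) (w v : Int), m[((((i : Int)), w) : Int × Int)]? = some v → v = pvS wts i w

theorem pvInv_empty (wts : List Int) : pvInv wts (∅ : Std.HashMap (Int × Int) Int) := by
  intro i w v h
  simp at h

theorem pvInv_insert (wts : List Int) (m : Std.HashMap (Int × Int) Int) (j : Nat) (w v : Int)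
    (hm : pvInv wts m) (hv : pvS wts j w = v) :
    pvInv wts (m.insert ((j : Int), w) v) := by
  intro i' w' v' h
  rw [Std.HashMap.getElem?_insert] at h
  split_ifs at h with he
  · rw [beq_iff_eq, Prod.mk.injEq] at he
    obtain ⟨h1, h2⟩ := he
    have hij : i' = j := by exact_mod_cast h1.symm
    subst hij; subst h2
    injection h with h
    omega
  · exact hm i' w' v' h

-- Reduction shapes of pvSolveB in the two memo cases.
theorem pvSolveB_succ_some (wts : List Int) (i : Nat) (w v : Int) (m : Std.HashMap (Int × Int) Int)
    (hw : ¬ w ≤ 0) (hget : m[((((i : Int) + 1), w) : Int × Int)]? = some v) :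
    pvSolveB wts (i + 1) w m = (v, m) := by
  simp only [pvSolveB, if_neg hw]
  rw [hget]

theorem pvSolveB_succ_none (wts : List Int) (i : Nat) (w : Int) (m : Std.HashMap (Int × Int) Int)
    (hw : ¬ w ≤ 0) (hget : m[((((i : Int) + 1), w) : Int × Int)]? = none) :
    pvSolveB wts (i + 1) w m =
      if PySem.List.pyGetD wts (i : Int) 0 ≤ w then
        (max (pvSolveB wts i w m).1
            (PySem.List.pyGetD wts (i : Int) 0 +
              (pvSolveB wts i (w - PySem.List.pyGetD wts (i : Int) 0) (pvSolveB wts i w m).2).1),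
          (pvSolveB wts i (w - PySem.List.pyGetD wts (i : Int) 0) (pvSolveB wts i w m).2).2.insert
            (((i : Int) + 1), w)
            (max (pvSolveB wts i w m).1
              (PySem.List.pyGetD wts (i : Int) 0 +
                (pvSolveB wts i (w - PySem.List.pyGetD wts (i : Int) 0) (pvSolveB wts i w m).2).1)))
      else ((pvSolveB wts i w m).1,
        (pvSolveB wts i w m).2.insert (((i : Int) + 1), w) (pvSolveB wts i w m).1) := by
  simp only [pvSolveB, if_neg hw]
  rw [hget]

theorem pvSolveB_correct (wts : List Int) : ∀ (i : Nat) (w : Int) (m : Std.HashMap (Int × Int) Int),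
    pvInv wts m → (pvSolveB wts i w m).1 = pvS wts i w ∧ pvInv wts (pvSolveB wts i w m).2 := by
  intro i
  induction i with
  | zero => intro w m hm; exact ⟨rfl, hm⟩
  | succ i ih =>
    intro w m hm
    by_cases hw : w ≤ 0
    · constructor
      · simp [pvSolveB, pvS, hw]
      · simp only [pvSolveB, if_pos hw]; exact hm
    · cases hget : m[((((i : Int) + 1), w) : Int × Int)]? with
      | some v =>
        have hv : v = pvS wts (i + 1) w := by
          have hget2 : m[(((((i + 1 : Nat)) : Int), w) : Int × Int)]? = some v := by push_cast; exact hget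
          exact hm (i + 1) w v hget2
        rw [pvSolveB_succ_some wts i w v m hw hget]
        exact ⟨hv, hm⟩
      | none =>
        obtain ⟨h1, hmi1⟩ := ih w m hm
        rw [pvSolveB_succ_none wts i w m hw hget]
        by_cases hwi : PySem.List.pyGetD wts (i : Int) 0 ≤ w
        · obtain ⟨h2, hmi2⟩ := ih (w - PySem.List.pyGetD wts (i : Int) 0) (pvSolveB wts i w m).2 hmi1
          simp only [if_pos hwi]
          refine ⟨?_, ?_⟩
          · simp only [h1, h2, pvS, if_neg hw, if_pos hwi]
          · have hc : ((i : Int) + 1) = (((i + 1 : Nat)) : Int) := by push_cast; ring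
            rw [hc]
            exact pvInv_insert wts _ (i + 1) w _ hmi2
              (by simp only [pvS, if_neg hw, if_pos hwi, h1, h2])
        · simp only [if_neg hwi]
          refine ⟨?_, ?_⟩
          · simp only [h1, pvS, if_neg hw, if_neg hwi]
          · have hc : ((i : Int) + 1) = (((i + 1 : Nat)) : Int) := by push_cast; ring
            rw [hc]
            exact pvInv_insert wts _ (i + 1) w _ hmi1
              (by simp only [pvS, if_neg hw, if_neg hwi, h1])

theorem pvS_nonneg (wts : List Int) : ∀ (i : Nat) (w : Int), 0 ≤ pvS wts i w := by
  intro i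
  induction i with
  | zero => intro w; simp [pvS]
  | succ i ih =>
    intro w
    simp only [pvS]
    split_ifs with h1 h2
    · omega
    · exact le_max_of_le_left (ih w)
    · exact ih w

theorem pvS_mono_succ (wts : List Int) (i : Nat) (w : Int) : pvS wts i w ≤ pvS wts (i + 1) w := by
  by_cases hw : w ≤ 0
  · have h0 : pvS wts i w = 0 := by cases i <;> simp [pvS, hw]
    simp [pvS, hw, h0]
  · simp only [pvS, if_neg hw]
    split_ifs with h2
    · exact le_max_left _ _
    · exact le_refl _

-- A positive value is attainable as soon as one element fits the capacity.
theorem pvS_pos (wts : List Int) : ∀ (i : Nat) (w : Int) (j : Nat), j < i →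
    1 ≤ PySem.List.pyGetD wts (j : Int) 0 → PySem.List.pyGetD wts (j : Int) 0 ≤ w →
    0 < pvS wts i w := by
  intro i
  induction i with
  | zero => intro w j hj _ _; omega
  | succ i ih =>
    intro w j hj h1 h2
    by_cases hji : j = i
    · subst hji
      have hw : ¬ w ≤ 0 := by omega
      simp only [pvS, if_neg hw, if_pos h2]
      have : 0 < PySem.List.pyGetD wts (j : Int) 0 + pvS wts j (w - PySem.List.pyGetD wts (j : Int) 0) := by
        have := pvS_nonneg wts j (w - PySem.List.pyGetD wts (j : Int) 0)
        omega
      exact lt_of_lt_of_le this (le_max_right _ _)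
    · exact lt_of_lt_of_le (ih w j (by omega) h1 h2) (pvS_mono_succ wts i w)

-- pvPickB only ever appends to its accumulator …
theorem pvPickB_len_le (wts : List Int) : ∀ (i : Nat) (res w : Int) (acc : List Int)
    (m : Std.HashMap (Int × Int) Int), acc.length ≤ (pvPickB wts i res w acc m).length := by
  intro i
  induction i with
  | zero => intro res w acc m; exact le_refl _
  | succ i ih =>
    intro res w acc m
    simp only [pvPickB]
    split_ifs with h1 h2
    · exact le_refl _
    · exact le_trans (by simp) (ih _ _ (acc ++ [(i : Int)]) _)
    · exact ih _ _ acc _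

-- … and strictly grows it while a positive residual value remains.
theorem pvPickB_len_lt (wts : List Int) : ∀ (i : Nat) (res w : Int) (acc : List Int)
    (m : Std.HashMap (Int × Int) Int), pvInv wts m → res = pvS wts i w → 0 < res →
    acc.length < (pvPickB wts i res w acc m).length := by
  intro i
  induction i with
  | zero =>
    intro res w acc m _ hres hpos
    simp only [pvS] at hres
    omega
  | succ i ih =>
    intro res w acc m hm hres hpos
    obtain ⟨h1, h2⟩ := pvSolveB_correct wts i w m hm
    simp only [pvPickB, if_neg (show ¬ res ≤ 0 by omega)]
    split_ifs with hne
    · exact lt_of_lt_of_le (by simp) (pvPickB_len_le wts i _ _ (acc ++ [(i : Int)]) _)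
    · have he : res = pvS wts i w := by rw [not_not] at hne; rw [hne, h1]
      exact ih _ _ acc _ h2 he hpos

-- A's wt[i] is an element of wt (for i < len), hence ≥ 1 under the precondition.
theorem pvWt_mem (wt : List Int) (i : Nat) (hi : i < wt.length) :
    PySem.List.pyGetD wt (i : Int) 0 ∈ wt := by
  rw [PySem.List.pyGetD_eq_getElem wt 0 (Int.natCast_nonneg i) (by exact_mod_cast hi)]
  simp only [Int.toNat_natCast]
  exact wt.getElem_mem hi

-- pvAGet on a list's array is exactly pyGetD on the list.
theorem pvAGet_toArray (xs : List Int) (i : Int) (d : Int) :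
    pvAGet xs.toArray i d = PySem.List.pyGetD xs i d := by
  unfold pvAGet PySem.List.pyGetD PySem.List.pyGet?
  rw [List.size_toArray]
  cases PySem.List.pyIdx? xs.length i with
  | none => rfl
  | some k => simp

-- Row i of A's table holds the spec values on 0 ≤ w ≤ W.
theorem pvTableA_row (wt : List Int) (W : Int) (hwt : ∀ x ∈ wt, 1 ≤ x) :
    ∀ (i : Nat), i ≤ wt.length → ∀ (w : Int), 0 ≤ w → w ≤ W →
      PySem.List.pyGetD (pvTableA wt W i).2 w 0 = pvS wt i w := by
  intro i
  induction i with
  | zero =>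
    intro _ w hw0 hwW
    simp only [pvTableA]
    rw [PySem.List.pyGetD_map_pyRange_of_nonneg _ _ _ _ hw0 (by omega)]
    simp [pvS]
  | succ i ih =>
    intro hin w hw0 hwW
    have hwi1 : 1 ≤ PySem.List.pyGetD wt (i : Int) 0 := hwt _ (pvWt_mem wt i (by omega))
    simp only [pvTableA]
    rw [PySem.List.pyGetD_map_pyRange_of_nonneg _ _ _ _ hw0 (by omega)]
    simp only [pvAGet_toArray]
    by_cases hw : w = 0
    · subst hw; simp [pvS]
    · simp only [if_neg hw]
      have hwpos : ¬ w ≤ 0 := by omega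
      by_cases hle : PySem.List.pyGetD wt (i : Int) 0 ≤ w
      · rw [if_pos hle,
          ih (by omega) (w - PySem.List.pyGetD wt (i : Int) 0) (by omega) (by omega),
          ih (by omega) w hw0 hwW]
        simp only [pvS, if_neg hwpos, if_pos hle]
        exact max_comm _ _
      · rw [if_neg hle, ih (by omega) w hw0 hwW]
        simp only [pvS, if_neg hwpos, if_neg hle]

theorem pvTableA_len (wt : List Int) (W : Int) :
    ∀ (n : Nat), ((pvTableA wt W n).1).length = n + 1 := by
  intro n
  induction n with
  | zero => simp [pvTableA]
  | succ n ih => simp [pvTableA, ih]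

-- The full table's row lookup K[j] is the pvTableA row j.
theorem pvTableA_prefix (wt : List Int) (W : Int) :
    ∀ (n j : Nat), j ≤ n →
      PySem.List.pyGetD (pvTableA wt W n).1 (j : Int) [] = (pvTableA wt W j).2 := by
  intro n
  induction n with
  | zero =>
    intro j hj
    have : j = 0 := by omega
    subst this
    simp [pvTableA]
  | succ n ih =>
    intro j hj
    have hlen := pvTableA_len wt W n
    by_cases hje : j = n + 1
    · subst hje
      simp only [pvTableA, PySem.List.pyGetD_natCast]
      rw [List.getD_eq_getElem?_getD, List.getElem?_append_right (by omega)]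
      simp [hlen]
    · have hjn : j ≤ n := by omega
      rw [← ih j hjn]
      simp only [pvTableA, PySem.List.pyGetD_natCast]
      rw [List.getD_eq_getElem?_getD, List.getElem?_append_left (by omega),
        ← List.getD_eq_getElem?_getD]

-- Both reconstruction loops pick the same indices.
theorem pvRecon_eq (wt : List Int) (W : Int) (hwt : ∀ x ∈ wt, 1 ≤ x ∧ x ≤ W) :
    ∀ (i : Nat), i ≤ wt.length → ∀ (res w : Int) (acc : List Int) (m : Std.HashMap (Int × Int) Int),
      pvInv wt m → res = pvS wt i w → 0 ≤ w → w ≤ W →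
      pvReconA (pvTableA wt W wt.length).1 wt i res w acc = pvPickB wt i res w acc m := by
  intro i
  induction i with
  | zero => intro _ res w acc m _ _ _ _; rfl
  | succ i ih =>
    intro hin res w acc m hm hres hw0 hwW
    by_cases hr0 : res ≤ 0
    · simp [pvReconA, pvPickB, hr0]
    · simp only [pvReconA, pvPickB, if_neg hr0]
      have hKv : PySem.List.pyGetD (PySem.List.pyGetD (pvTableA wt W wt.length).1 (i : Int) []) w 0
          = pvS wt i w := by
        rw [pvTableA_prefix wt W wt.length i (by omega)]
        exact pvTableA_row wt W (fun x hx => (hwt x hx).1) i (by omega) w hw0 hwW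
      obtain ⟨hB1, hB2⟩ := pvSolveB_correct wt i w m hm
      rw [hKv, hB1]
      by_cases heq : res = pvS wt i w
      · simp only [if_pos heq, if_neg (by omega : ¬ res ≠ pvS wt i w)]
        exact ih (by omega) res w acc _ hB2 heq hw0 hwW
      · simp only [if_neg heq, if_pos (by omega : res ≠ pvS wt i w)]
        -- res = pvS (i+1) w, res ≠ pvS i w, res > 0: the take branch of the max was chosen.
        have hwpos : ¬ w ≤ 0 := by
          intro hww
          rw [hres] at hr0
          simp only [pvS, if_pos hww] at hr0
          exact hr0 le_rfl
        have hwi1 : 1 ≤ PySem.List.pyGetD wt (i : Int) 0 := (hwt _ (pvWt_mem wt i (by omega))).1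
        have hle : PySem.List.pyGetD wt (i : Int) 0 ≤ w := by
          by_contra hle
          rw [hres] at heq
          apply heq
          simp only [pvS, if_neg hwpos, if_neg hle]
        have htake : res = PySem.List.pyGetD wt (i : Int) 0 + pvS wt i (w - PySem.List.pyGetD wt (i : Int) 0) := by
          rw [hres] at heq ⊢
          simp only [pvS, if_neg hwpos, if_pos hle] at heq ⊢
          rcases max_choice (pvS wt i w)
            (PySem.List.pyGetD wt (i : Int) 0 + pvS wt i (w - PySem.List.pyGetD wt (i : Int) 0)) with h | h
          · exact absurd h heq
          · exact h
        exact ih (by omega) _ _ _ _ hB2 (by omega) (by omega) (by omega)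

-- pyGetD into a mapped list, component-wise (the defaults line up: (0,0).1 = 0, (0,0).2 = 0).
theorem pvGetD_fst (items : List (Int × Int)) (i : Int) :
    (PySem.List.pyGetD items i ((0 : Int), (0 : Int))).1
      = PySem.List.pyGetD (items.map (fun p => p.1)) i 0 := by
  rw [show (0 : Int) = (((0 : Int), (0 : Int)) : Int × Int).1 from rfl,
    PySem.List.pyGetD_map (fun p => p.1) items i]

theorem pvGetD_snd (items : List (Int × Int)) (i : Int) :
    (PySem.List.pyGetD items i ((0 : Int), (0 : Int))).2
      = PySem.List.pyGetD (items.map (fun p => p.2)) i 0 := by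
  rw [show (0 : Int) = (((0 : Int), (0 : Int)) : Int × Int).2 from rfl,
    PySem.List.pyGetD_map (fun p => p.2) items i]

theorem pvContains_ofList (l : List Int) (j : Int) :
    (PySem.Set.ofList l).contains j = l.contains j := by
  rw [PySem.Set.contains_eq_listContains]
  by_cases h : j ∈ l
  · rw [List.contains_iff_mem.mpr ((PySem.Set.mem_ofList l j).mpr h),
      List.contains_iff_mem.mpr h]
  · rw [Bool.eq_iff_iff]
    simp [h]

-- The two outer loops agree, relating A's (wt, ori_idx) pair of lists to B's items list.
set_option maxHeartbeats 2000000 in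
theorem pvLoop_eq (W : Int) :
    ∀ (fuel : Nat) (items : List (Int × Int)) (acc1 : List Int) (acc2 : List (List Int)),
      (∀ x ∈ items.map (fun p => p.2), 1 ≤ x ∧ x ≤ W) →
      pvLoopA W fuel (items.map (fun p => p.2)) (items.map (fun p => p.1)) acc1 acc2
        = pvLoopB W fuel items acc1 acc2 := by
  intro fuel
  induction fuel with
  | zero => intros; rfl
  | succ fuel ih =>
    intro items acc1 acc2 hwt
    by_cases hemp : items.length = 0
    · simp [pvLoopA, pvLoopB, hemp]
    · obtain ⟨p0, hp0⟩ := List.exists_mem_of_ne_nil items (by intro h; simp [h] at hemp)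
      have hW0 : 0 ≤ W := by
        have := hwt p0.2 (List.mem_map_of_mem hp0)
        omega
      have hS := pvSolveB_correct (items.map (fun p => p.2)) (items.map (fun p => p.2)).length W (∅ : Std.HashMap (Int × Int) Int) (pvInv_empty _)
      have hresret : PySem.List.pyGetD (pvTableA (items.map (fun p => p.2)) W (items.map (fun p => p.2)).length).2 W 0
          = pvS (items.map (fun p => p.2)) (items.map (fun p => p.2)).length W :=
        pvTableA_row _ W (fun x hx => (hwt x hx).1) _ le_rfl W hW0 le_rfl
      have hidx : pvReconA (pvTableA (items.map (fun p => p.2)) W (items.map (fun p => p.2)).length).1 (items.map (fun p => p.2)) (items.map (fun p => p.2)).length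
            (pvS (items.map (fun p => p.2)) (items.map (fun p => p.2)).length W) W []
          = pvPickB (items.map (fun p => p.2)) (items.map (fun p => p.2)).length (pvS (items.map (fun p => p.2)) (items.map (fun p => p.2)).length W) W []
            (pvSolveB (items.map (fun p => p.2)) (items.map (fun p => p.2)).length W (∅ : Std.HashMap (Int × Int) Int)).2 :=
        pvRecon_eq _ W hwt _ le_rfl _ W [] _ hS.2 rfl hW0 le_rfl
      have hpos : 0 < pvS (items.map (fun p => p.2)) (items.map (fun p => p.2)).length W := by
        have hlt : 0 < (items.map (fun p => p.2)).length := by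
          simp only [List.length_map]
          omega
        have hmem := hwt _ (pvWt_mem (items.map (fun p => p.2)) 0 hlt)
        exact pvS_pos (items.map (fun p => p.2)) _ W 0 hlt hmem.1 hmem.2
      have hlt0 := pvPickB_len_lt (items.map (fun p => p.2)) (items.map (fun p => p.2)).length
        (pvS (items.map (fun p => p.2)) (items.map (fun p => p.2)).length W) W []
        (pvSolveB (items.map (fun p => p.2)) (items.map (fun p => p.2)).length W
          (∅ : Std.HashMap (Int × Int) Int)).2 hS.2 rfl hpos
      have hknap : pvKnapA W (items.map (fun p => p.2))
          = (pvS (items.map (fun p => p.2)) (items.map (fun p => p.2)).length W,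
             (pvPickB (items.map (fun p => p.2)) (items.map (fun p => p.2)).length
          (pvS (items.map (fun p => p.2)) (items.map (fun p => p.2)).length W) W []
          (pvSolveB (items.map (fun p => p.2)) (items.map (fun p => p.2)).length W (∅ : Std.HashMap (Int × Int) Int)).2).reverse) := by
        simp only [pvKnapA]
        rw [hresret, hidx]
      have hstep : pvStepB W items
          = (pvS (items.map (fun p => p.2)) (items.map (fun p => p.2)).length W,
             ((pvPickB (items.map (fun p => p.2)) (items.map (fun p => p.2)).length
          (pvS (items.map (fun p => p.2)) (items.map (fun p => p.2)).length W) W []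
          (pvSolveB (items.map (fun p => p.2)) (items.map (fun p => p.2)).length W (∅ : Std.HashMap (Int × Int) Int)).2).reverse).map
               (fun i => (PySem.List.pyGetD items i ((0 : Int), (0 : Int))).1),
             ((PySem.List.enumerate items).filter (fun q =>
                 !(PySem.Set.contains (PySem.Set.ofList
                   ((pvPickB (items.map (fun p => p.2)) (items.map (fun p => p.2)).length
          (pvS (items.map (fun p => p.2)) (items.map (fun p => p.2)).length W) W []
          (pvSolveB (items.map (fun p => p.2)) (items.map (fun p => p.2)).length W (∅ : Std.HashMap (Int × Int) Int)).2).reverse)) q.1))).map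
               (fun q => q.2)) := by
        simp only [pvStepB]
        rw [hS.1]
      -- shorthand for the picked index list
      generalize hpk : (pvPickB (items.map (fun p => p.2)) (items.map (fun p => p.2)).length
          (pvS (items.map (fun p => p.2)) (items.map (fun p => p.2)).length W) W []
          (pvSolveB (items.map (fun p => p.2)) (items.map (fun p => p.2)).length W (∅ : Std.HashMap (Int × Int) Int)).2).reverse = picked at hknap hstep
      -- the remaining items, as B computes them, re-expressed through pyRange
      have hitems' : ((PySem.List.enumerate items).filter (fun q =>
              !(PySem.Set.contains (PySem.Set.ofList picked) q.1))).map (fun q => q.2)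
          = ((PySem.List.pyRange 0 (items.length : Int)).filter (fun j => !(picked.contains j))).map
              (fun j => PySem.List.pyGetD items j ((0 : Int), (0 : Int))) := by
        rw [PySem.List.enumerate_eq_map_pyRange items ((0 : Int), (0 : Int))]
        rw [List.filter_map, List.map_map]
        simp only [PySem.List.len_eq, Function.comp_def, pvContains_ofList]
      have hplen : 0 < picked.length := by
        rw [← hpk, List.length_reverse]
        simpa using hlt0
      -- one unfolding step of each loop
      simp only [pvLoopA, pvLoopB, List.length_map, if_neg hemp]
      rw [hknap, hstep, hitems']
      -- the raise branch in B never fires inside Pre_: something was picked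
      rw [if_neg (show ¬ ((picked.map (fun i => (PySem.List.pyGetD items i ((0 : Int), (0 : Int))).1)).length = 0) by
        rw [List.length_map]; omega)]
      -- A's selected original indices are B's (the defaults line up componentwise)
      simp only [pvGetD_fst]
      -- A's filtered (wt, ori) pair is the component image of B's filtered items
      rw [show ((PySem.List.pyRange 0 (items.length : Int)).filter (fun j => !(picked.contains j))).map
            (fun i => PySem.List.pyGetD (items.map (fun p => p.2)) i 0)
          = (((PySem.List.pyRange 0 (items.length : Int)).filter (fun j => !(picked.contains j))).map
              (fun j => PySem.List.pyGetD items j ((0 : Int), (0 : Int)))).map (fun p => p.2) from by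
        rw [List.map_map]; simp only [Function.comp_def, pvGetD_snd]]
      rw [show ((PySem.List.pyRange 0 (items.length : Int)).filter (fun j => !(picked.contains j))).map
            (fun i => PySem.List.pyGetD (items.map (fun p => p.1)) i 0)
          = (((PySem.List.pyRange 0 (items.length : Int)).filter (fun j => !(picked.contains j))).map
              (fun j => PySem.List.pyGetD items j ((0 : Int), (0 : Int)))).map (fun p => p.1) from by
        rw [List.map_map]; simp only [Function.comp_def, pvGetD_fst]]
      apply ih
      -- the precondition is preserved: every remaining weight is a weight of items
      intro x hx
      simp only [List.map_map, List.mem_map, List.mem_filter] at hx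
      obtain ⟨j, ⟨hjr, _⟩, hxe⟩ := hx
      rw [PySem.List.mem_pyRange_one] at hjr
      have hjlt : (j.toNat) < items.length := by omega
      have hje : PySem.List.pyGetD items j ((0 : Int), (0 : Int)) = items[j.toNat] :=
        PySem.List.pyGetD_eq_getElem items _ (by omega) (by exact_mod_cast hjr.2)
      apply hwt
      rw [← hxe]
      simp only [Function.comp_def, hje]
      exact List.mem_map_of_mem (items.getElem_mem hjlt)

-- ===== VERDICT (by name: the statement is the Claim_ definition above) =====
theorem group_windows_spec : Claim_equal_group_windows := by
  unfold Claim_equal_group_windows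
  intro group_size num_ele_win _hdom hpre
  unfold Spec_group_windows group_windows group_windows_alt
  have h := pvLoop_eq group_size num_ele_win.length (PySem.List.enumerate num_ele_win) [] []
    (by rw [PySem.List.map_snd_enumerate num_ele_win 0]; exact hpre)
  rw [PySem.List.map_snd_enumerate num_ele_win 0, PySem.List.map_fst_enumerate num_ele_win 0,
    zero_add] at h
  exact h
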